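-- pv_equiv track=rewrite | github.com/yfh667/generic | draw/basic_functio/get_rectangular_size_interval.py | calc_envelope_for_group
-- ===== SOURCE A (Python) =====
-- from typing import Dict, Tuple, Optional
--
-- def calc_envelope_for_group(
--     group_data: Dict[int, dict],
--     interval: Tuple[int, int],
--     groupid: int,
--     P: int,
--     N: int
-- ) -> Tuple[Optional[Tuple[int, int, int, int]], Optional[Tuple[int, int, int, int]]]:
--     """
--     计算指定时间区间内、指定 group 的包络矩形。
--
--     返回统一为 (left_box, right_box)：
--       - 不跨缝：left_box = 单个矩形, right_box = None
--       - 跨缝：   left_box, right_box = 各自的矩形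
--       - 没有数据：返回 (None, None)
--     """
--
--     t0, t1 = interval
--     times = [t for t in sorted(group_data.keys()) if t0 <= t <= t1]
--     if not times:
--         return None, None
--
--     left_seam, right_seam = False, False
--     x_min = y_min = None
--     x_max = y_max = None
--
--     # --- 检查是否跨缝 ---
--     for t in times:
--         g = group_data.get(t, {})
--         groups = g.get('groups', {})
--         sats = groups.get(groupid, set())
--         if not sats:
--             continue
--
--         xs = [sid // N for sid in sats]
--         ys = [sid % N for sid in sats]
--
--         if 0 in xs:
--             left_seam = True
--         if (P - 1) in xs:
--             right_seam = True
--
--         _xmin, _xmax = min(xs), max(xs)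
--         _ymin, _ymax = min(ys), max(ys)
--
--         x_min = _xmin if x_min is None else min(x_min, _xmin)
--         x_max = _xmax if x_max is None else max(x_max, _xmax)
--         y_min = _ymin if y_min is None else min(y_min, _ymin)
--         y_max = _ymax if y_max is None else max(y_max, _ymax)
--
--     # --- 不跨缝：只返回一个矩形 ---
--     if not (left_seam and right_seam):
--         if x_min is None:
--             return None, None
--         return (x_min, x_max, y_min, y_max), None
--
--     # --- 跨缝：分两块 ---
--     split_plane = P // 2
--     left_box  = [None, None, None, None]
--     right_box = [None, None, None, None]
--
--     def _update(box, x_val, y_val):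
--         box[0] = x_val if box[0] is None else min(box[0], x_val)
--         box[1] = x_val if box[1] is None else max(box[1], x_val)
--         box[2] = y_val if box[2] is None else min(box[2], y_val)
--         box[3] = y_val if box[3] is None else max(box[3], y_val)
--
--     for t in times:
--         sats = group_data.get(t, {}).get('groups', {}).get(groupid, set())
--         for sid in sats:
--             x_sid, y_sid = divmod(sid, N)
--             if x_sid >= split_plane:
--                 _update(right_box, x_sid, y_sid)
--             else:
--                 _update(left_box, x_sid, y_sid)
--
--     def _finalize(box):
--         if box[0] is None:
--             return None
--         return tuple(int(v) for v in box)
--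
--     return _finalize(left_box), _finalize(right_box)
-- ===== SOURCE B (Python) =====
-- def calc_envelope_for_group(group_data, interval, groupid, P, N):
--     t0, t1 = interval
--     # column index: x -> (lowest y, highest y) over every satellite seen in the window
--     cols = {}
--     for t, bucket in group_data.items():
--         if t0 <= t <= t1:
--             for sid in bucket.get('groups', {}).get(groupid, set()):
--                 x, y = divmod(sid, N)
--                 lo, hi = cols.get(x, (y, y))
--                 cols[x] = (min(lo, y), max(hi, y))
--     if not cols:
--         return None, None
--
--     def box(items):
--         if not items:
--             return None
--         return (min(x for x, _ in items), max(x for x, _ in items),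
--                 min(lo for _, (lo, _) in items), max(hi for _, (_, hi) in items))
--
--     if 0 in cols and P - 1 in cols:
--         half = P // 2
--         items = list(cols.items())
--         return (box([it for it in items if it[0] < half]),
--                 box([it for it in items if it[0] >= half]))
--     return box(list(cols.items())), None
-- ===== Notes on version B (the rewrite author's own statement) =====
-- stated objective: alternative
-- what changed: Replaces A's sorted-time double pass with routed min/max accumulators by a different data structure: one unsorted pass over the raw dict builds a column index x -> (ymin, ymax); the seam test becomes two dictionary lookups and every box (whole or split) is a reduce over the column entries instead of over satellites, and the sort of the time keys disappears entirely.
import Mathlib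
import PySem

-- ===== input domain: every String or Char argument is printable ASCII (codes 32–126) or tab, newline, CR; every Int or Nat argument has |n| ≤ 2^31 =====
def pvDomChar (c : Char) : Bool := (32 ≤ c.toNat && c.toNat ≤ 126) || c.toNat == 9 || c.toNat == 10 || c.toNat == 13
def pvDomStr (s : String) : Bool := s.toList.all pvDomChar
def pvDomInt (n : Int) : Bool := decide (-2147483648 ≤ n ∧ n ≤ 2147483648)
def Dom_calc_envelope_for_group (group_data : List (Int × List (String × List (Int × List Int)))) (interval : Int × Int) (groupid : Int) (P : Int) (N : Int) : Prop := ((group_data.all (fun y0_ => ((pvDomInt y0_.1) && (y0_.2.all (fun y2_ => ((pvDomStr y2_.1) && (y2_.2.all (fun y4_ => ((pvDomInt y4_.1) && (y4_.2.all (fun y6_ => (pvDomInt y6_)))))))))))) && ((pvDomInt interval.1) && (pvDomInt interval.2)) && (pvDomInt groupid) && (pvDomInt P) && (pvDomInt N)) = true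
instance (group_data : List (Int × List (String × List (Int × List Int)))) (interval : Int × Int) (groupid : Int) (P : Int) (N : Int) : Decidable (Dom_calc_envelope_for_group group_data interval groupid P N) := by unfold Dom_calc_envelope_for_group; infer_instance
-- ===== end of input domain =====

-- ===== PORT A =====
-- B replaces A's sorted-time double pass (seam flags + optional min/max accumulators, then a routed
-- second pass) by a column index x -> (ymin, ymax) built in one unsorted pass; boxes reduce over
-- columns and the seam test is two dict lookups. Objective: alternative. Equivalence on Pre_ (no ZeroDivisionError).

-- shared accessor: group_data.get(t, {}).get('groups', {}).get(groupid, set())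
def pvSats (group_data : List (Int × List (String × List (Int × List Int)))) (groupid : Int) (t : Int) : List Int :=
  ((PySem.Dict.ofList (((PySem.Dict.ofList (((PySem.Dict.ofList group_data).get? t).getD [])).get? "groups").getD [])).get? groupid).getD []

-- A: times = [t for t in sorted(group_data) if t0 <= t <= t1]
def pvTimes (group_data : List (Int × List (String × List (Int × List Int)))) (t0 t1 : Int) : List Int :=
  (PySem.List.sorted (PySem.Dict.keys (PySem.Dict.ofList group_data)) (fun t => t) false).filter
    (fun t => decide (t0 ≤ t) && decide (t ≤ t1))

-- A's x_min/x_max/y_min/y_max "None-or-min/max" updates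
def pvOMin (o : Option Int) (v : Int) : Option Int :=
  match o with | none => some v | some a => some (min a v)
def pvOMax (o : Option Int) (v : Int) : Option Int :=
  match o with | none => some v | some a => some (max a v)

-- the body of A's first loop over times
def pvStep1 (group_data : List (Int × List (String × List (Int × List Int)))) (groupid P N : Int)
    (st : Bool × Bool × Option Int × Option Int × Option Int × Option Int) (t : Int) :
    Bool × Bool × Option Int × Option Int × Option Int × Option Int :=
  let sats := pvSats group_data groupid t
  if sats = [] then st else
  let xs := sats.map (fun sid => PySem.Int.floordiv sid N)
  let ys := sats.map (fun sid => PySem.Int.mod sid N)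
  (st.1 || xs.contains 0,
   st.2.1 || xs.contains (P - 1),
   pvOMin st.2.2.1 ((PySem.List.min? xs (fun v => v)).getD 0),      -- min(xs); xs ≠ [] here
   pvOMax st.2.2.2.1 ((PySem.List.max? xs (fun v => v)).getD 0),
   pvOMin st.2.2.2.2.1 ((PySem.List.min? ys (fun v => v)).getD 0),
   pvOMax st.2.2.2.2.2 ((PySem.List.max? ys (fun v => v)).getD 0))

-- A's _update: the box's four slots are None/set strictly in lockstep, modeled as one Option of the 4-tuple
def pvUpdate (b : Option (Int × Int × Int × Int)) (x y : Int) : Option (Int × Int × Int × Int) :=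
  match b with
  | none => some (x, x, y, y)
  | some (a, b', c, d) => some (min a x, max b' x, min c y, max d y)

-- the body of A's second (seam) loop: inner loop over sats, routing by x >= split_plane
def pvInner (split N : Int) (bs : Option (Int × Int × Int × Int) × Option (Int × Int × Int × Int)) (sid : Int) :
    Option (Int × Int × Int × Int) × Option (Int × Int × Int × Int) :=
  let x := PySem.Int.floordiv sid N
  let y := PySem.Int.mod sid N
  if split ≤ x then (bs.1, pvUpdate bs.2 x y) else (pvUpdate bs.1 x y, bs.2)

def pvStep2 (group_data : List (Int × List (String × List (Int × List Int)))) (groupid N split : Int)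
    (bs : Option (Int × Int × Int × Int) × Option (Int × Int × Int × Int)) (t : Int) :
    Option (Int × Int × Int × Int) × Option (Int × Int × Int × Int) :=
  (pvSats group_data groupid t).foldl (pvInner split N) bs

def calc_envelope_for_group (group_data : List (Int × List (String × List (Int × List Int)))) (interval : Int × Int) (groupid : Int) (P : Int) (N : Int) : (Option (Int × Int × Int × Int)) × (Option (Int × Int × Int × Int)) :=
  let times := pvTimes group_data interval.1 interval.2
  if times = [] then (none, none) else
  let st := times.foldl (pvStep1 group_data groupid P N) (false, false, none, none, none, none)
  if !(st.1 && st.2.1) then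
    match st.2.2.1, st.2.2.2.1, st.2.2.2.2.1, st.2.2.2.2.2 with
    | some xm, some xM, some ym, some yM => (some (xm, xM, ym, yM), none)
    | _, _, _, _ => (none, none)    -- x_min is None (the four accumulators are None in lockstep)
  else
    times.foldl (pvStep2 group_data groupid N (PySem.Int.floordiv P 2)) (none, none)
    -- _finalize is the identity on the lockstep model

-- ===== PORT B =====
-- B: bucket.get('groups', {}).get(groupid, set()) for one bucket value
def pvSatsOfVal (v : List (String × List (Int × List Int))) (groupid : Int) : List Int :=
  ((PySem.Dict.ofList (((PySem.Dict.ofList v).get? "groups").getD [])).get? groupid).getD []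

-- B's inner statement: lo, hi = cols.get(x, (y, y)); cols[x] = (min(lo, y), max(hi, y))
def pvColStep (N : Int) (c : PySem.Dict Int (Int × Int)) (sid : Int) : PySem.Dict Int (Int × Int) :=
  let x := PySem.Int.floordiv sid N
  let y := PySem.Int.mod sid N
  let q := (c.get? x).getD (y, y)
  c.insert x (min q.1 y, max q.2 y)

-- B's single pass: for t, bucket in group_data.items(): if t0 <= t <= t1: for sid in ...
def pvCols (group_data : List (Int × List (String × List (Int × List Int)))) (t0 t1 groupid N : Int) :
    PySem.Dict Int (Int × Int) :=
  (PySem.Dict.ofList group_data).items.foldl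
    (fun c tv =>
      if decide (t0 ≤ tv.1) && decide (tv.1 ≤ t1) then
        (pvSatsOfVal tv.2 groupid).foldl (pvColStep N) c
      else c)
    PySem.Dict.empty

-- B's box(items) over a list of column entries (x, (lo, hi))
def pvBoxI (items : List (Int × Int × Int)) : Option (Int × Int × Int × Int) :=
  if items = [] then none else
  some ((PySem.List.min? (items.map (fun it => it.1)) (fun v => v)).getD 0,
        (PySem.List.max? (items.map (fun it => it.1)) (fun v => v)).getD 0,
        (PySem.List.min? (items.map (fun it => it.2.1)) (fun v => v)).getD 0,
        (PySem.List.max? (items.map (fun it => it.2.2)) (fun v => v)).getD 0)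

def calc_envelope_for_group_alt (group_data : List (Int × List (String × List (Int × List Int)))) (interval : Int × Int) (groupid : Int) (P : Int) (N : Int) : (Option (Int × Int × Int × Int)) × (Option (Int × Int × Int × Int)) :=
  let cols := pvCols group_data interval.1 interval.2 groupid N
  if cols.items = [] then (none, none) else
  if cols.contains 0 && cols.contains (P - 1) then
    let half := PySem.Int.floordiv P 2
    (pvBoxI (cols.items.filter (fun it => decide (it.1 < half))),
     pvBoxI (cols.items.filter (fun it => decide (half ≤ it.1))))
  else
    (pvBoxI cols.items, none)

-- ===== PRECONDITION & SPEC =====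
-- Pre_ excludes exactly the inputs on which A raises ZeroDivisionError: N = 0 while some
-- satellite set of this group is non-empty at a time inside the interval.
def Pre_calc_envelope_for_group (group_data : List (Int × List (String × List (Int × List Int)))) (interval : Int × Int) (groupid : Int) (P : Int) (N : Int) : Prop :=
  N ≠ 0 ∨ ∀ t ∈ PySem.Dict.keys (PySem.Dict.ofList group_data),
    interval.1 ≤ t → t ≤ interval.2 → pvSats group_data groupid t = []
instance (group_data : List (Int × List (String × List (Int × List Int)))) (interval : Int × Int) (groupid : Int) (P : Int) (N : Int) : Decidable (Pre_calc_envelope_for_group group_data interval groupid P N) := by unfold Pre_calc_envelope_for_group; infer_instance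

def pvWitness_calc_envelope_for_group : (List (Int × List (String × List (Int × List Int)))) × (Int × Int) × Int × Int × Int :=
  ([(0, [("groups", [(1, [5, 0])])])], (0, 0), 1, 4, 2)

def Spec_calc_envelope_for_group (group_data : List (Int × List (String × List (Int × List Int)))) (interval : Int × Int) (groupid : Int) (P : Int) (N : Int) (out : (Option (Int × Int × Int × Int)) × (Option (Int × Int × Int × Int))) : Prop := out = calc_envelope_for_group_alt group_data interval groupid P N
instance (group_data : List (Int × List (String × List (Int × List Int)))) (interval : Int × Int) (groupid : Int) (P : Int) (N : Int) (out : (Option (Int × Int × Int × Int)) × (Option (Int × Int × Int × Int))) : Decidable (Spec_calc_envelope_for_group group_data interval groupid P N out) := by unfold Spec_calc_envelope_for_group; infer_instance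

-- ===== CLAIM (what is proved, stated in full; the proofs are below) =====
def Claim_equal_calc_envelope_for_group : Prop := ∀ (group_data : List (Int × List (String × List (Int × List Int)))) (interval : Int × Int) (groupid : Int) (P : Int) (N : Int), Dom_calc_envelope_for_group group_data interval groupid P N → Pre_calc_envelope_for_group group_data interval groupid P N → Spec_calc_envelope_for_group group_data interval groupid P N (calc_envelope_for_group group_data interval groupid P N)

-- ===== LEMMAS AND PROOFS =====

-- proof-side: one bucket's points (x, y) = divmod(sid, N), and the flat point list in A's order
def pvPtsOf (group_data : List (Int × List (String × List (Int × List Int)))) (groupid N t : Int) : List (Int × Int) :=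
  (pvSats group_data groupid t).map (fun sid => (PySem.Int.floordiv sid N, PySem.Int.mod sid N))

-- proof-side: min/max box of a point list
def pvBox (part : List (Int × Int)) : Option (Int × Int × Int × Int) :=
  if part = [] then none else
  some ((PySem.List.min? (part.map (fun p => p.1)) (fun v => v)).getD 0,
        (PySem.List.max? (part.map (fun p => p.1)) (fun v => v)).getD 0,
        (PySem.List.min? (part.map (fun p => p.2)) (fun v => v)).getD 0,
        (PySem.List.max? (part.map (fun p => p.2)) (fun v => v)).getD 0)

-- proof-side common reference point: the envelope as a function of the point multiset
def pvE (pts : List (Int × Int)) (P : Int) : (Option (Int × Int × Int × Int)) × (Option (Int × Int × Int × Int)) :=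
  if pts = [] then (none, none) else
  let xs := pts.map (fun p => p.1)
  if xs.contains 0 && xs.contains (P - 1) then
    let split := PySem.Int.floordiv P 2
    (pvBox (pts.filter (fun p => decide (p.1 < split))),
     pvBox (pts.filter (fun p => decide (split ≤ p.1))))
  else
    (pvBox pts, none)

-- A's point list / B's point list
def pvPtsA (gd : List (Int × List (String × List (Int × List Int)))) (t0 t1 groupid N : Int) : List (Int × Int) :=
  (pvTimes gd t0 t1).flatMap (pvPtsOf gd groupid N)
def pvPtsB (gd : List (Int × List (String × List (Int × List Int)))) (t0 t1 groupid N : Int) : List (Int × Int) :=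
  ((PySem.Dict.ofList gd).items.filter (fun tv => decide (t0 ≤ tv.1) && decide (tv.1 ≤ t1))).flatMap
    (fun tv => (pvSatsOfVal tv.2 groupid).map (fun sid => (PySem.Int.floordiv sid N, PySem.Int.mod sid N)))

-- B's dict fold, point at a time
def pvColAdd (c : PySem.Dict Int (Int × Int)) (p : Int × Int) : PySem.Dict Int (Int × Int) :=
  let q := (c.get? p.1).getD (p.2, p.2)
  c.insert p.1 (min q.1 p.2, max q.2 p.2)
def pvColsOf (pts : List (Int × Int)) : PySem.Dict Int (Int × Int) :=
  pts.foldl pvColAdd PySem.Dict.empty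


theorem pv_foldl_min_pull (t : List Int) : ∀ (a x : Int), t.foldl min (min a x) = min a (t.foldl min x) := by
  induction t with
  | nil => intro a x; rfl
  | cons h t ih =>
    intro a x
    simp only [List.foldl_cons, min_assoc]
    exact ih a (min x h)

theorem pv_foldl_max_pull (t : List Int) : ∀ (a x : Int), t.foldl max (max a x) = max a (t.foldl max x) := by
  induction t with
  | nil => intro a x; rfl
  | cons h t ih =>
    intro a x
    simp only [List.foldl_cons, max_assoc]
    exact ih a (max x h)

theorem pv_foldl_omin_some (t : List Int) : ∀ (a : Int), t.foldl pvOMin (some a) = some (t.foldl min a) := by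
  induction t with
  | nil => intro a; rfl
  | cons h t ih => intro a; simpa [pvOMin] using ih (min a h)

theorem pv_foldl_omax_some (t : List Int) : ∀ (a : Int), t.foldl pvOMax (some a) = some (t.foldl max a) := by
  induction t with
  | nil => intro a; rfl
  | cons h t ih => intro a; simpa [pvOMax] using ih (max a h)

-- combining the accumulator with min(xs) of a non-empty xs = folding pvOMin over xs
theorem pv_omin_step (xs : List Int) (h : xs ≠ []) (o : Option Int) :
    pvOMin o ((PySem.List.min? xs (fun v => v)).getD 0) = xs.foldl pvOMin o := by
  cases xs with
  | nil => exact absurd rfl h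
  | cons x t =>
    rw [PySem.List.min?_id_cons]
    cases o with
    | none => simp [pvOMin, pv_foldl_omin_some]
    | some a => simp [pvOMin, pv_foldl_omin_some, pv_foldl_min_pull]

theorem pv_omax_step (xs : List Int) (h : xs ≠ []) (o : Option Int) :
    pvOMax o ((PySem.List.max? xs (fun v => v)).getD 0) = xs.foldl pvOMax o := by
  cases xs with
  | nil => exact absurd rfl h
  | cons x t =>
    rw [PySem.List.max?_id_cons]
    cases o with
    | none => simp [pvOMax, pv_foldl_omax_some]
    | some a => simp [pvOMax, pv_foldl_omax_some, pv_foldl_max_pull]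

theorem pv_foldl_omin_none (xs : List Int) (h : xs ≠ []) :
    xs.foldl pvOMin none = some ((PySem.List.min? xs (fun v => v)).getD 0) := by
  cases xs with
  | nil => exact absurd rfl h
  | cons x t => rw [PySem.List.min?_id_cons]; simpa [pvOMin] using pv_foldl_omin_some t x

theorem pv_foldl_omax_none (xs : List Int) (h : xs ≠ []) :
    xs.foldl pvOMax none = some ((PySem.List.max? xs (fun v => v)).getD 0) := by
  cases xs with
  | nil => exact absurd rfl h
  | cons x t => rw [PySem.List.max?_id_cons]; simpa [pvOMax] using pv_foldl_omax_some t x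

-- A's first loop, characterised over the flattened point list
theorem pv_loop1_char (gd : List (Int × List (String × List (Int × List Int)))) (groupid P N : Int) :
    ∀ (ts : List Int) (st : Bool × Bool × Option Int × Option Int × Option Int × Option Int),
    ts.foldl (pvStep1 gd groupid P N) st =
      (st.1 || ((ts.flatMap (pvPtsOf gd groupid N)).map (fun p => p.1)).contains 0,
       st.2.1 || ((ts.flatMap (pvPtsOf gd groupid N)).map (fun p => p.1)).contains (P - 1),
       ((ts.flatMap (pvPtsOf gd groupid N)).map (fun p => p.1)).foldl pvOMin st.2.2.1,
       ((ts.flatMap (pvPtsOf gd groupid N)).map (fun p => p.1)).foldl pvOMax st.2.2.2.1,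
       ((ts.flatMap (pvPtsOf gd groupid N)).map (fun p => p.2)).foldl pvOMin st.2.2.2.2.1,
       ((ts.flatMap (pvPtsOf gd groupid N)).map (fun p => p.2)).foldl pvOMax st.2.2.2.2.2) := by
  intro ts
  induction ts with
  | nil => intro st; simp
  | cons t ts ih =>
    intro st
    by_cases hs : pvSats gd groupid t = []
    · simp [List.foldl_cons, pvStep1, hs, pvPtsOf, ih]
    · have hx : (pvSats gd groupid t).map (fun sid => PySem.Int.floordiv sid N) ≠ [] := by
        simpa using hs
      have hy : (pvSats gd groupid t).map (fun sid => PySem.Int.mod sid N) ≠ [] := by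
        simpa using hs
      have hstep : pvStep1 gd groupid P N st t =
          (st.1 || ((pvSats gd groupid t).map (fun sid => PySem.Int.floordiv sid N)).contains 0,
           st.2.1 || ((pvSats gd groupid t).map (fun sid => PySem.Int.floordiv sid N)).contains (P - 1),
           ((pvSats gd groupid t).map (fun sid => PySem.Int.floordiv sid N)).foldl pvOMin st.2.2.1,
           ((pvSats gd groupid t).map (fun sid => PySem.Int.floordiv sid N)).foldl pvOMax st.2.2.2.1,
           ((pvSats gd groupid t).map (fun sid => PySem.Int.mod sid N)).foldl pvOMin st.2.2.2.2.1,
           ((pvSats gd groupid t).map (fun sid => PySem.Int.mod sid N)).foldl pvOMax st.2.2.2.2.2) := by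
        simp [pvStep1, hs, pv_omin_step _ hx, pv_omax_step _ hx, pv_omin_step _ hy, pv_omax_step _ hy]
      rw [List.foldl_cons, hstep, ih]
      simp [List.flatMap_cons, List.map_append, List.foldl_append,
        pvPtsOf, List.map_map, Function.comp_def, Bool.or_assoc]

-- A's seam loop = a fold of the routed point update over the flattened point list
theorem pv_loop2_flat (gd : List (Int × List (String × List (Int × List Int)))) (groupid N split : Int) :
    ∀ (ts : List Int) (bs : Option (Int × Int × Int × Int) × Option (Int × Int × Int × Int)),
    ts.foldl (pvStep2 gd groupid N split) bs =
      (ts.flatMap (pvPtsOf gd groupid N)).foldl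
        (fun bs (p : Int × Int) =>
          if split ≤ p.1 then (bs.1, pvUpdate bs.2 p.1 p.2) else (pvUpdate bs.1 p.1 p.2, bs.2)) bs := by
  intro ts
  induction ts with
  | nil => intro bs; rfl
  | cons t ts ih =>
    intro bs
    simp only [List.foldl_cons, List.flatMap_cons, List.foldl_append, ih, pvStep2, pvPtsOf,
      List.foldl_map]
    rfl

-- routing: each point goes to exactly one of the two boxes
theorem pv_route (split : Int) :
    ∀ (l : List (Int × Int)) (bs : Option (Int × Int × Int × Int) × Option (Int × Int × Int × Int)),
    l.foldl (fun bs (p : Int × Int) =>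
        if split ≤ p.1 then (bs.1, pvUpdate bs.2 p.1 p.2) else (pvUpdate bs.1 p.1 p.2, bs.2)) bs =
      ((l.filter (fun p => decide (p.1 < split))).foldl (fun b (p : Int × Int) => pvUpdate b p.1 p.2) bs.1,
       (l.filter (fun p => decide (split ≤ p.1))).foldl (fun b (p : Int × Int) => pvUpdate b p.1 p.2) bs.2) := by
  intro l
  induction l with
  | nil => intro bs; rfl
  | cons p l ih =>
    intro bs
    by_cases h : split ≤ p.1
    · simp [List.foldl_cons, h, not_lt.mpr h, ih]
    · simp [List.foldl_cons, h, not_le.mp h, ih]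

theorem pv_foldbox_some (t : List (Int × Int)) :
    ∀ (a b c d : Int), t.foldl (fun b (p : Int × Int) => pvUpdate b p.1 p.2) (some (a, b, c, d)) =
      some ((t.map (fun p => p.1)).foldl min a, (t.map (fun p => p.1)).foldl max b,
            (t.map (fun p => p.2)).foldl min c, (t.map (fun p => p.2)).foldl max d) := by
  induction t with
  | nil => intro a b c d; rfl
  | cons p t ih => intro a b c d; simpa [pvUpdate] using ih (min a p.1) (max b p.1) (min c p.2) (max d p.2)

theorem pv_box_eq_fold (l : List (Int × Int)) :
    pvBox l = l.foldl (fun b (p : Int × Int) => pvUpdate b p.1 p.2) none := by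
  cases l with
  | nil => rfl
  | cons p t =>
    rw [List.foldl_cons, show pvUpdate none p.1 p.2 = some (p.1, p.1, p.2, p.2) from rfl,
      pv_foldbox_some]
    simp [pvBox, PySem.List.min?_id_cons, PySem.List.max?_id_cons]

theorem pv_A_eq_E (gd : List (Int × List (String × List (Int × List Int)))) (interval : Int × Int) (groupid P N : Int) :
    calc_envelope_for_group gd interval groupid P N = pvE (pvPtsA gd interval.1 interval.2 groupid N) P := by
  unfold calc_envelope_for_group pvE pvPtsA
  by_cases ht : pvTimes gd interval.1 interval.2 = []
  · simp [ht]
  · rw [if_neg ht]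
    rw [pv_loop1_char]
    set pts := (pvTimes gd interval.1 interval.2).flatMap (pvPtsOf gd groupid N) with hpts
    by_cases hp : pts = []
    · simp [hp]
    · have hx : pts.map (fun p => p.1) ≠ [] := by simpa using hp
      have hy : pts.map (fun p => p.2) ≠ [] := by simpa using hp
      rw [if_neg hp]
      by_cases hc : ((pts.map (fun p => p.1)).contains 0 && (pts.map (fun p => p.1)).contains (P - 1)) = true
      · simp only [hc, Bool.false_or, Bool.not_true, if_true, if_false, Bool.false_eq_true]
        rw [pv_loop2_flat, pv_route, pv_box_eq_fold, pv_box_eq_fold]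
      · have hc' : ((pts.map (fun p => p.1)).contains 0 && (pts.map (fun p => p.1)).contains (P - 1)) = false :=
          by simpa using hc
        simp only [hc', Bool.false_or, Bool.not_false, if_true,
          pv_foldl_omin_none _ hx, pv_foldl_omax_none _ hx,
          pv_foldl_omin_none _ hy, pv_foldl_omax_none _ hy]
        simp [pvBox, hp]


-- min/max of two lists with the same member set agree
theorem pv_min?_eq_of_mem_iff (l1 l2 : List Int) (h : ∀ a, a ∈ l1 ↔ a ∈ l2) :
    PySem.List.min? l1 (fun v => v) = PySem.List.min? l2 (fun v => v) := by
  cases h1 : PySem.List.min? l1 (fun v => v) with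
  | none =>
    have : l1 = [] := (PySem.List.min?_eq_none_iff _ _).1 h1
    subst this
    have : l2 = [] := List.eq_nil_iff_forall_not_mem.2 (fun a ha => by simpa using (h a).2 ha)
    simp [this, PySem.List.min?]
  | some m =>
    have hm1 : m ∈ l1 := PySem.List.min?_mem h1
    have hm2 : m ∈ l2 := (h m).1 hm1
    cases h2 : PySem.List.min? l2 (fun v => v) with
    | none =>
      have : l2 = [] := (PySem.List.min?_eq_none_iff _ _).1 h2
      subst this; simp at hm2
    | some m' =>
      have hm'1 : m' ∈ l1 := (h m').2 (PySem.List.min?_mem h2)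
      have h1le : m ≤ m' := PySem.List.min?_isMin h1 m' hm'1
      have h2le : m' ≤ m := PySem.List.min?_isMin h2 m hm2
      exact congrArg some (le_antisymm h1le h2le)

theorem pv_max?_eq_of_mem_iff (l1 l2 : List Int) (h : ∀ a, a ∈ l1 ↔ a ∈ l2) :
    PySem.List.max? l1 (fun v => v) = PySem.List.max? l2 (fun v => v) := by
  cases h1 : PySem.List.max? l1 (fun v => v) with
  | none =>
    have : l1 = [] := (PySem.List.max?_eq_none_iff _ _).1 h1
    subst this
    have : l2 = [] := List.eq_nil_iff_forall_not_mem.2 (fun a ha => by simpa using (h a).2 ha)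
    simp [this, PySem.List.max?]
  | some m =>
    have hm1 : m ∈ l1 := PySem.List.max?_mem h1
    have hm2 : m ∈ l2 := (h m).1 hm1
    cases h2 : PySem.List.max? l2 (fun v => v) with
    | none =>
      have : l2 = [] := (PySem.List.max?_eq_none_iff _ _).1 h2
      subst this; simp at hm2
    | some m' =>
      have hm'1 : m' ∈ l1 := (h m').2 (PySem.List.max?_mem h2)
      have h1le : m' ≤ m := PySem.List.max?_isMax h1 m' hm'1
      have h2le : m ≤ m' := PySem.List.max?_isMax h2 m hm2
      exact congrArg some (le_antisymm h2le h1le)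

theorem pv_box_mem_congr (p1 p2 : List (Int × Int)) (h : ∀ p, p ∈ p1 ↔ p ∈ p2) :
    pvBox p1 = pvBox p2 := by
  have hnil : (p1 = []) ↔ (p2 = []) := by
    constructor
    · intro he
      refine List.eq_nil_iff_forall_not_mem.2 (fun a ha => ?_)
      have := (h a).2 ha; rw [he] at this; simp at this
    · intro he
      refine List.eq_nil_iff_forall_not_mem.2 (fun a ha => ?_)
      have := (h a).1 ha; rw [he] at this; simp at this
  have hmapf : ∀ (f : Int × Int → Int) a, a ∈ p1.map f ↔ a ∈ p2.map f := by
    intro f a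
    simp only [List.mem_map]
    exact ⟨fun ⟨p, hp, he⟩ => ⟨p, (h p).1 hp, he⟩, fun ⟨p, hp, he⟩ => ⟨p, (h p).2 hp, he⟩⟩
  unfold pvBox
  by_cases h1 : p1 = []
  · simp [h1, hnil.1 h1]
  · rw [if_neg h1, if_neg (fun he => h1 (hnil.2 he))]
    rw [pv_min?_eq_of_mem_iff _ _ (hmapf (fun p => p.1)),
        pv_max?_eq_of_mem_iff _ _ (hmapf (fun p => p.1)),
        pv_min?_eq_of_mem_iff _ _ (hmapf (fun p => p.2)),
        pv_max?_eq_of_mem_iff _ _ (hmapf (fun p => p.2))]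

theorem pv_E_mem_congr (pts1 pts2 : List (Int × Int)) (P : Int)
    (h : ∀ p, p ∈ pts1 ↔ p ∈ pts2) : pvE pts1 P = pvE pts2 P := by
  have hnil : (pts1 = []) ↔ (pts2 = []) := by
    constructor
    · intro he
      refine List.eq_nil_iff_forall_not_mem.2 (fun a ha => ?_)
      have := (h a).2 ha; rw [he] at this; simp at this
    · intro he
      refine List.eq_nil_iff_forall_not_mem.2 (fun a ha => ?_)
      have := (h a).1 ha; rw [he] at this; simp at this
  have hmapf : ∀ a, a ∈ pts1.map (fun p => p.1) ↔ a ∈ pts2.map (fun p => p.1) := by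
    intro a
    simp only [List.mem_map]
    exact ⟨fun ⟨p, hp, he⟩ => ⟨p, (h p).1 hp, he⟩, fun ⟨p, hp, he⟩ => ⟨p, (h p).2 hp, he⟩⟩
  have hcont : ∀ a : Int, (pts1.map (fun p => p.1)).contains a = (pts2.map (fun p => p.1)).contains a := by
    intro a
    simp only [List.contains_eq_mem]
    exact decide_eq_decide.mpr (hmapf a)
  have hfilt : ∀ (q : Int × Int → Bool) p, p ∈ pts1.filter q ↔ p ∈ pts2.filter q := by
    intro q p
    simp only [List.mem_filter]
    exact ⟨fun ⟨hp, hq⟩ => ⟨(h p).1 hp, hq⟩, fun ⟨hp, hq⟩ => ⟨(h p).2 hp, hq⟩⟩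
  unfold pvE
  by_cases h1 : pts1 = []
  · simp [h1, hnil.1 h1]
  · rw [if_neg h1, if_neg (fun he => h1 (hnil.2 he))]
    simp only [hcont]
    rw [pv_box_mem_congr _ _ (hfilt _), pv_box_mem_congr _ _ (hfilt _), pv_box_mem_congr _ _ h]


-- value looked up through the whole dict = the item's own value (keys of ofList are unique)
theorem pv_sats_of_items (gd : List (Int × List (String × List (Int × List Int)))) (groupid : Int)
    (tv : Int × List (String × List (Int × List Int))) (htv : tv ∈ (PySem.Dict.ofList gd).items) :
    pvSats gd groupid tv.1 = pvSatsOfVal tv.2 groupid := by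
  obtain ⟨t, v⟩ := tv
  have hg : (PySem.Dict.ofList gd).get? t = some v :=
    PySem.Dict.get?_of_mem_items _ htv (PySem.Dict.nodup_keys_ofList gd)
  simp [pvSats, pvSatsOfVal, hg]

theorem pv_ptsA_mem_iff_ptsB (gd : List (Int × List (String × List (Int × List Int)))) (t0 t1 groupid N : Int) :
    ∀ p, p ∈ pvPtsA gd t0 t1 groupid N ↔ p ∈ pvPtsB gd t0 t1 groupid N := by
  intro p
  unfold pvPtsA pvPtsB pvTimes pvPtsOf
  simp only [List.mem_flatMap, List.mem_filter, PySem.List.mem_sorted]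
  constructor
  · rintro ⟨t, ⟨htk, hw⟩, hp⟩
    have : ∃ tv ∈ (PySem.Dict.ofList gd).items, tv.1 = t := by
      simpa [PySem.Dict.keys, List.mem_map] using htk
    obtain ⟨tv, htv, rfl⟩ := this
    refine ⟨tv, ⟨htv, hw⟩, ?_⟩
    rw [← pv_sats_of_items gd groupid tv htv]
    exact hp
  · rintro ⟨tv, ⟨htv, hw⟩, hp⟩
    refine ⟨tv.1, ⟨?_, hw⟩, ?_⟩
    · simp only [PySem.Dict.keys, List.mem_map]
      exact ⟨tv, htv, rfl⟩
    · rw [pv_sats_of_items gd groupid tv htv]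
      exact hp


-- B's dict-building pass = a point-at-a-time fold over the flat point list
theorem pv_cols_flat (gd : List (Int × List (String × List (Int × List Int)))) (t0 t1 groupid N : Int) :
    pvCols gd t0 t1 groupid N = pvColsOf (pvPtsB gd t0 t1 groupid N) := by
  unfold pvCols pvColsOf pvPtsB
  have key : ∀ (l : List (Int × List (String × List (Int × List Int)))) (c : PySem.Dict Int (Int × Int)),
      l.foldl (fun c tv =>
          if decide (t0 ≤ tv.1) && decide (tv.1 ≤ t1) then
            (pvSatsOfVal tv.2 groupid).foldl (pvColStep N) c
          else c) c =
        ((l.filter (fun tv => decide (t0 ≤ tv.1) && decide (tv.1 ≤ t1))).flatMap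
          (fun tv => (pvSatsOfVal tv.2 groupid).map
            (fun sid => (PySem.Int.floordiv sid N, PySem.Int.mod sid N)))).foldl pvColAdd c := by
    intro l
    induction l with
    | nil => intro c; rfl
    | cons tv l ih =>
      intro c
      by_cases hw : (decide (t0 ≤ tv.1) && decide (tv.1 ≤ t1)) = true
      · rw [List.foldl_cons, if_pos hw]
        simp only [List.filter_cons, hw, if_true]
        rw [List.flatMap_cons, List.foldl_append, ← ih]
        congr 1
        rw [List.foldl_map]
        rfl
      · have hw' : (decide (t0 ≤ tv.1) && decide (tv.1 ≤ t1)) = false := by simpa using hw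
        rw [List.foldl_cons, if_neg hw]
        simp only [List.filter_cons, hw', Bool.false_eq_true, if_false]
        exact ih c
  exact key _ _

theorem pv_cols_nodup (pts : List (Int × Int)) : (pvColsOf pts).keys.Nodup := by
  have he : pvColsOf pts =
      pts.foldl (fun d p => d.insert p.1
        (min (((d.get? p.1).getD (p.2, p.2)).1) p.2, max (((d.get? p.1).getD (p.2, p.2)).2) p.2))
        PySem.Dict.empty := rfl
  rw [he]
  exact PySem.Dict.nodup_keys_foldl_insert_key pts (fun p => p.1) _ _ (by simp)

-- the column index is exact: lookup at x is none iff no point sits in column x, and the stored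
-- pair is the least / greatest y of column x
theorem pv_cols_spec (pts : List (Int × Int)) (x : Int) :
    ((pvColsOf pts).get? x = none → ∀ y, (x, y) ∉ pts) ∧
    (∀ lo hi, (pvColsOf pts).get? x = some (lo, hi) →
      (x, lo) ∈ pts ∧ (x, hi) ∈ pts ∧ ∀ y, (x, y) ∈ pts → lo ≤ y ∧ y ≤ hi) := by
  induction pts using List.reverseRecOn with
  | nil =>
    constructor
    · intro _ y; simp
    · intro lo hi h
      rw [show pvColsOf [] = PySem.Dict.empty from rfl, PySem.Dict.get?_empty] at h
      cases h
  | append_singleton pts p ih =>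
    have hstep : pvColsOf (pts ++ [p]) = pvColAdd (pvColsOf pts) p := by
      simp [pvColsOf, List.foldl_append]
    obtain ⟨px, py⟩ := p
    by_cases hx : x = px
    · subst hx
      have hget : (pvColAdd (pvColsOf pts) (x, py)).get? x =
          some (min (((pvColsOf pts).get? x).getD (py, py)).1 py,
                max (((pvColsOf pts).get? x).getD (py, py)).2 py) := by
        simp [pvColAdd]
      constructor
      · intro hnone; rw [hstep, hget] at hnone; cases hnone
      · intro lo hi h
        rw [hstep, hget] at h
        have h' := Option.some.inj h
        rw [Prod.mk.injEq] at h'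
        obtain ⟨hlo, hhi⟩ := h'
        cases hq : (pvColsOf pts).get? x with
        | none =>
          rw [hq] at hlo hhi
          simp at hlo hhi
          subst hlo; subst hhi
          refine ⟨by simp, by simp, ?_⟩
          intro y hy
          rcases List.mem_append.1 hy with hm | hm
          · exact absurd hm (ih.1 hq y)
          · simp at hm; omega
        | some q0 =>
          obtain ⟨l0, h0⟩ := q0
          rw [hq] at hlo hhi
          simp at hlo hhi
          obtain ⟨ha, hb, hc⟩ := ih.2 l0 h0 hq
          constructor
          · rcases le_total l0 py with hle | hle
            · rw [← hlo] at *; rw [min_eq_left hle]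
              exact List.mem_append_left _ ha
            · rw [← hlo, min_eq_right hle]; simp
          constructor
          · rcases le_total h0 py with hle | hle
            · rw [← hhi, max_eq_right hle]; simp
            · rw [← hhi, max_eq_left hle]
              exact List.mem_append_left _ hb
          · intro y hy
            rcases List.mem_append.1 hy with hm | hm
            · have := hc y hm; omega
            · simp at hm; omega
    · have hget : (pvColAdd (pvColsOf pts) (px, py)).get? x = (pvColsOf pts).get? x := by
        simp [pvColAdd, PySem.Dict.get?_insert, hx]
      constructor
      · intro hnone y hy
        rw [hstep, hget] at hnone
        rcases List.mem_append.1 hy with hm | hm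
        · exact ih.1 hnone y hm
        · simp at hm; exact hx hm.1
      · intro lo hi h
        rw [hstep, hget] at h
        obtain ⟨ha, hb, hc⟩ := ih.2 lo hi h
        refine ⟨List.mem_append_left _ ha, List.mem_append_left _ hb, ?_⟩
        intro y hy
        rcases List.mem_append.1 hy with hm | hm
        · exact hc y hm
        · simp at hm; exact absurd hm.1 hx

theorem pv_min?_eq_some_of (l : List Int) (m : Int) (hm : m ∈ l) (hle : ∀ y ∈ l, m ≤ y) :
    PySem.List.min? l (fun v => v) = some m := by
  cases h : PySem.List.min? l (fun v => v) with
  | none =>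
    have : l = [] := (PySem.List.min?_eq_none_iff _ _).1 h
    subst this; simp at hm
  | some m' =>
    exact congrArg some (le_antisymm (PySem.List.min?_isMin h m hm) (hle m' (PySem.List.min?_mem h)))

theorem pv_max?_eq_some_of (l : List Int) (m : Int) (hm : m ∈ l) (hle : ∀ y ∈ l, y ≤ m) :
    PySem.List.max? l (fun v => v) = some m := by
  cases h : PySem.List.max? l (fun v => v) with
  | none =>
    have : l = [] := (PySem.List.max?_eq_none_iff _ _).1 h
    subst this; simp at hm
  | some m' =>
    exact congrArg some (le_antisymm (hle m' (PySem.List.max?_mem h)) (PySem.List.max?_isMax h m hm))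

-- THE box correspondence: the box over filtered column entries = the box over filtered points
theorem pv_box_cols (pts : List (Int × Int)) (q : Int → Bool) :
    pvBoxI (((pvColsOf pts).items).filter (fun it => q it.1)) =
      pvBox (pts.filter (fun p => q p.1)) := by
  have hnodup := pv_cols_nodup pts
  have hspec := pv_cols_spec pts
  -- membership translations
  have hIget : ∀ it ∈ ((pvColsOf pts).items).filter (fun it => q it.1),
      (pvColsOf pts).get? it.1 = some it.2 ∧ q it.1 = true := by
    intro it hit
    obtain ⟨hmem, hq⟩ := List.mem_filter.1 hit
    exact ⟨PySem.Dict.get?_of_mem_items _ hmem hnodup, hq⟩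
  have hIofget : ∀ x v, (pvColsOf pts).get? x = some v → q x = true →
      (x, v) ∈ ((pvColsOf pts).items).filter (fun it => q it.1) := by
    intro x v hg hq
    exact List.mem_filter.2 ⟨PySem.Dict.mem_items_of_get?_eq_some _ hg, hq⟩
  set I := ((pvColsOf pts).items).filter (fun it => q it.1) with hI
  set Pf := pts.filter (fun p => q p.1) with hPf
  have hPmem : ∀ p ∈ Pf, p ∈ pts ∧ q p.1 = true := fun p hp => List.mem_filter.1 hp
  have hnil : I = [] ↔ Pf = [] := by
    constructor
    · intro he
      refine List.eq_nil_iff_forall_not_mem.2 (fun p hp => ?_)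
      obtain ⟨hpp, hq⟩ := hPmem p hp
      cases hg : (pvColsOf pts).get? p.1 with
      | none => exact (hspec p.1).1 hg p.2 (by simpa using hpp)
      | some v =>
        have := hIofget p.1 v hg hq
        rw [he] at this; simp at this
    · intro he
      refine List.eq_nil_iff_forall_not_mem.2 (fun it hit => ?_)
      obtain ⟨hg, hq⟩ := hIget it hit
      obtain ⟨ha, _, _⟩ := (hspec it.1).2 it.2.1 it.2.2 (by rw [hg])
      have : (it.1, it.2.1) ∈ Pf := List.mem_filter.2 ⟨ha, hq⟩
      rw [he] at this; simp at this
  have hxmem : ∀ a, a ∈ I.map (fun it => it.1) ↔ a ∈ Pf.map (fun p => p.1) := by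
    intro a
    simp only [List.mem_map]
    constructor
    · rintro ⟨it, hit, rfl⟩
      obtain ⟨hg, hq⟩ := hIget it hit
      obtain ⟨ha, _, _⟩ := (hspec it.1).2 it.2.1 it.2.2 (by rw [hg])
      exact ⟨(it.1, it.2.1), List.mem_filter.2 ⟨ha, hq⟩, rfl⟩
    · rintro ⟨p, hp, rfl⟩
      obtain ⟨hpp, hq⟩ := hPmem p hp
      cases hg : (pvColsOf pts).get? p.1 with
      | none => exact absurd (by simpa using hpp) ((hspec p.1).1 hg p.2)
      | some v => exact ⟨(p.1, v), hIofget p.1 v hg hq, rfl⟩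
  have hlo : PySem.List.min? (I.map (fun it => it.2.1)) (fun v => v) =
      PySem.List.min? (Pf.map (fun p => p.2)) (fun v => v) := by
    by_cases hp : Pf = []
    · rw [hp, hnil.2 hp]; rfl
    · cases hmB : PySem.List.min? (Pf.map (fun p => p.2)) (fun v => v) with
      | none =>
        have := (PySem.List.min?_eq_none_iff _ _).1 hmB
        simp at this; exact absurd this hp
      | some m =>
        have hmmem := PySem.List.min?_mem hmB
        obtain ⟨p0, hp0, hp0m⟩ := List.mem_map.1 hmmem
        obtain ⟨hp0p, hq0⟩ := hPmem p0 hp0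
        cases hg : (pvColsOf pts).get? p0.1 with
        | none => exact absurd (by simpa using hp0p) ((hspec p0.1).1 hg p0.2)
        | some v =>
          obtain ⟨hlo0, _, hbnd⟩ := (hspec p0.1).2 v.1 v.2 (by rw [hg])
          -- the stored lo of p0's column equals m
          have hvm : v.1 = m := by
            have h1 : v.1 ≤ m := by
              have := (hbnd p0.2 (by simpa using hp0p)).1
              omega
            have h2 : m ≤ v.1 := by
              have : v.1 ∈ Pf.map (fun p => p.2) :=
                List.mem_map.2 ⟨(p0.1, v.1), List.mem_filter.2 ⟨hlo0, hq0⟩, rfl⟩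
              exact PySem.List.min?_isMin hmB v.1 this
            omega
          refine pv_min?_eq_some_of _ m ?_ ?_
          · exact List.mem_map.2 ⟨(p0.1, v), hIofget p0.1 v hg hq0, hvm⟩
          · intro a ha
            obtain ⟨it, hit, rfl⟩ := List.mem_map.1 ha
            obtain ⟨hg', hq'⟩ := hIget it hit
            obtain ⟨ha', _, _⟩ := (hspec it.1).2 it.2.1 it.2.2 (by rw [hg'])
            have : it.2.1 ∈ Pf.map (fun p => p.2) :=
              List.mem_map.2 ⟨(it.1, it.2.1), List.mem_filter.2 ⟨ha', hq'⟩, rfl⟩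
            exact PySem.List.min?_isMin hmB it.2.1 this
  have hhi : PySem.List.max? (I.map (fun it => it.2.2)) (fun v => v) =
      PySem.List.max? (Pf.map (fun p => p.2)) (fun v => v) := by
    by_cases hp : Pf = []
    · rw [hp, hnil.2 hp]; rfl
    · cases hmB : PySem.List.max? (Pf.map (fun p => p.2)) (fun v => v) with
      | none =>
        have := (PySem.List.max?_eq_none_iff _ _).1 hmB
        simp at this; exact absurd this hp
      | some m =>
        have hmmem := PySem.List.max?_mem hmB
        obtain ⟨p0, hp0, hp0m⟩ := List.mem_map.1 hmmem
        obtain ⟨hp0p, hq0⟩ := hPmem p0 hp0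
        cases hg : (pvColsOf pts).get? p0.1 with
        | none => exact absurd (by simpa using hp0p) ((hspec p0.1).1 hg p0.2)
        | some v =>
          obtain ⟨_, hhi0, hbnd⟩ := (hspec p0.1).2 v.1 v.2 (by rw [hg])
          have hvm : v.2 = m := by
            have h1 : m ≤ v.2 := by
              have := (hbnd p0.2 (by simpa using hp0p)).2
              omega
            have h2 : v.2 ≤ m := by
              have : v.2 ∈ Pf.map (fun p => p.2) :=
                List.mem_map.2 ⟨(p0.1, v.2), List.mem_filter.2 ⟨hhi0, hq0⟩, rfl⟩
              exact PySem.List.max?_isMax hmB v.2 this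
            omega
          refine pv_max?_eq_some_of _ m ?_ ?_
          · exact List.mem_map.2 ⟨(p0.1, v), hIofget p0.1 v hg hq0, hvm⟩
          · intro a ha
            obtain ⟨it, hit, rfl⟩ := List.mem_map.1 ha
            obtain ⟨hg', hq'⟩ := hIget it hit
            obtain ⟨_, hb', _⟩ := (hspec it.1).2 it.2.1 it.2.2 (by rw [hg'])
            have : it.2.2 ∈ Pf.map (fun p => p.2) :=
              List.mem_map.2 ⟨(it.1, it.2.2), List.mem_filter.2 ⟨hb', hq'⟩, rfl⟩
            exact PySem.List.max?_isMax hmB it.2.2 this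
  unfold pvBoxI pvBox
  by_cases h1 : I = []
  · simp [h1, hnil.1 h1]
  · rw [if_neg h1, if_neg (fun he => h1 (hnil.2 he))]
    rw [pv_min?_eq_of_mem_iff _ _ hxmem, pv_max?_eq_of_mem_iff _ _ hxmem, hlo, hhi]

theorem pv_B_eq_E (gd : List (Int × List (String × List (Int × List Int)))) (interval : Int × Int) (groupid P N : Int) :
    calc_envelope_for_group_alt gd interval groupid P N = pvE (pvPtsB gd interval.1 interval.2 groupid N) P := by
  unfold calc_envelope_for_group_alt pvE
  rw [pv_cols_flat]
  set pts := pvPtsB gd interval.1 interval.2 groupid N with hpts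
  have hspec := pv_cols_spec pts
  have hitems : (pvColsOf pts).items = [] ↔ pts = [] := by
    constructor
    · intro he
      refine List.eq_nil_iff_forall_not_mem.2 (fun p hp => ?_)
      cases hg : (pvColsOf pts).get? p.1 with
      | none => exact (hspec p.1).1 hg p.2 (by simpa using hp)
      | some v =>
        have := PySem.Dict.mem_items_of_get?_eq_some _ hg
        rw [he] at this; simp at this
    · intro he; rw [he]; rfl
  have hcont : ∀ a : Int, (pvColsOf pts).contains a = (pts.map (fun p => p.1)).contains a := by
    intro a
    rw [PySem.Dict.contains_eq_isSome_get?, List.contains_eq_mem]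
    cases hg : (pvColsOf pts).get? a with
    | none =>
      simp only [Option.isSome_none]
      symm
      rw [decide_eq_false_iff_not]
      intro hmem
      obtain ⟨p, hp, rfl⟩ := List.mem_map.1 hmem
      exact (hspec p.1).1 hg p.2 (by simpa using hp)
    | some v =>
      simp only [Option.isSome_some]
      symm
      rw [decide_eq_true_eq]
      obtain ⟨ha, _, _⟩ := (hspec a).2 v.1 v.2 (by rw [hg])
      exact List.mem_map.2 ⟨(a, v.1), ha, rfl⟩
  by_cases hnil : pts = []
  · rw [if_pos (hitems.2 hnil), if_pos hnil]
  · rw [if_neg (fun he => hnil (hitems.1 he)), if_neg hnil, hcont 0, hcont (P - 1)]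
    by_cases hseam : ((pts.map (fun p => p.1)).contains 0 && (pts.map (fun p => p.1)).contains (P - 1)) = true
    · rw [if_pos hseam, if_pos hseam]
      have hL := pv_box_cols pts (fun x => decide (x < PySem.Int.floordiv P 2))
      have hR := pv_box_cols pts (fun x => decide (PySem.Int.floordiv P 2 ≤ x))
      simp only [Prod.mk.injEq]
      exact ⟨hL, hR⟩
    · rw [if_neg hseam, if_neg hseam]
      have hW := pv_box_cols pts (fun _ => true)
      simp only [List.filter_true] at hW
      simp only [Prod.mk.injEq]
      exact ⟨hW, trivial⟩

-- ===== VERDICT (by name: the statement is the Claim_ definition above) =====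
theorem calc_envelope_for_group_spec : Claim_equal_calc_envelope_for_group := by
  intro gd interval groupid P N _ _
  unfold Spec_calc_envelope_for_group
  rw [pv_A_eq_E, pv_B_eq_E, pv_E_mem_congr _ _ P (pv_ptsA_mem_iff_ptsB gd interval.1 interval.2 groupid N)]
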